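-- pv_equiv track=rewrite | github.com/philvoyageurgroup/voyageur-intelligence | category_audits/formatter.py | _strip_leading_title
-- ===== SOURCE A (Python) =====
-- def _strip_leading_title(markdown: str) -> str:
--     """Remove the first heading block if it looks like a duplicate title.
--
--     Claude often generates a '# Category Intelligence Report: ...' line
--     at the very top of the markdown.  Since we already have a cover page
--     with identical information, strip it to avoid duplication.
--
--     Removes the first ``# ...`` heading (and any immediately following
--     blank lines or a single subtitle-like line) before the first ``##``.
--     """
--     lines = markdown.split("\n")
--     # Find first non-blank line
--     start = 0
--     while start < len(lines) and not lines[start].strip():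
--         start += 1
--
--     if start >= len(lines):
--         return markdown
--
--     first = lines[start].strip()
--     # Only strip if it's a top-level heading (single #)
--     if first.startswith("# ") and not first.startswith("## "):
--         # Drop that line
--         start += 1
--         # Drop any blank lines or a single non-heading subtitle right after
--         while start < len(lines):
--             s = lines[start].strip()
--             if not s:
--                 start += 1
--                 continue
--             if s.startswith("#"):
--                 break  # hit next real section — stop stripping
--             # It might be a subtitle like "SpaceAid Prospect Analysis" — skip it
--             start += 1
--             break  # only skip one subtitle line
--         # Skip trailing blanks after subtitle
--         while start < len(lines) and not lines[start].strip():
--             start += 1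
--         return "\n".join(lines[start:])
--
--     return markdown
-- ===== SOURCE B (Python) =====
-- def _drop_blanks(lines):
--     if lines and not lines[0].strip():
--         return _drop_blanks(lines[1:])
--     return lines
--
--
-- def _strip_leading_title(markdown: str) -> str:
--     """Remove a duplicate leading '# ...' title block (functional version).
--
--     Works on list suffixes with a recursive blank-dropper instead of
--     index-based while loops.
--     """
--     rest = _drop_blanks(markdown.split("\n"))
--     if not rest:
--         return markdown
--     head = rest[0].strip()
--     if not head.startswith("# "):
--         return markdown
--     rest = _drop_blanks(rest[1:])
--     if rest and not rest[0].strip().startswith("#"):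
--         rest = _drop_blanks(rest[1:])
--     return "\n".join(rest)
-- ===== Notes on version B (the rewrite author's own statement) =====
-- stated objective: simpler
-- what changed: Replaces A's index-based while-loop scanning (with continue/break and a shared mutable start cursor) by a functional pipeline over list suffixes: a recursive blank-line dropper applied between the title, optional subtitle and remainder.
import Mathlib
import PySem

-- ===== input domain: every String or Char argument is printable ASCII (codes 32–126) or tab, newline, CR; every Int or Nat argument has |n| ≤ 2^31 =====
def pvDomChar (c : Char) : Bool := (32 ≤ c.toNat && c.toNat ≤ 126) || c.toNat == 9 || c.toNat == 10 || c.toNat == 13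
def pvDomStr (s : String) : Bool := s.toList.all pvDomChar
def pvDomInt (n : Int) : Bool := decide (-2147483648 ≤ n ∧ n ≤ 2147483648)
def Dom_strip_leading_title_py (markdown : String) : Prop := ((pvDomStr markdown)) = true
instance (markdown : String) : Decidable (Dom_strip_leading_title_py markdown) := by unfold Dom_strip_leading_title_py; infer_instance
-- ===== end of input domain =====

-- B replaces A's index-based while-loop scan with a recursive blank-dropping pipeline
-- over list suffixes (objective: simpler; same return value, no side effects).

-- markdown.split("\n"): the separator "\n" is nonempty, so split? is always `some`; getD [] is never hit
def pvSplitNL (markdown : String) : List String :=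
  (PySem.Str.split? markdown "\n").getD []

-- ===== PORT A =====
-- 'while start < len(lines) and not lines[start].strip(): start += 1'
def pvSkipBlanksA (lines : List String) (start : Nat) : Nat :=
  if start < lines.length then
    if PySem.Str.strip (lines.getD start "") == "" then pvSkipBlanksA lines (start + 1)
    else start
  else start
termination_by lines.length - start

-- the middle 'while start < len(lines): … continue/break' loop of A
def pvMidA (lines : List String) (start : Nat) : Nat :=
  if start < lines.length then
    let s := PySem.Str.strip (lines.getD start "")
    if s == "" then pvMidA lines (start + 1)
    else if PySem.Str.startswith s "#" then start
    else start + 1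
  else start
termination_by lines.length - start

-- lines.getD start "" is used only where A has established start < len(lines), so it is lines[start]
def strip_leading_title_py (markdown : String) : String :=
  let lines := pvSplitNL markdown
  let start := pvSkipBlanksA lines 0
  if lines.length ≤ start then markdown
  else
    let first := PySem.Str.strip (lines.getD start "")
    if PySem.Str.startswith first "# " && !(PySem.Str.startswith first "## ") then
      let start := pvMidA lines (start + 1)
      let start := pvSkipBlanksA lines start
      PySem.Str.join "\n" (lines.drop start)
    else markdown

-- ===== PORT B =====
def pvDropBlanksB (lines : List String) : List String :=
  match lines with
  | [] => []
  | l :: rest => if PySem.Str.strip l == "" then pvDropBlanksB rest else l :: rest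

def strip_leading_title_py_alt (markdown : String) : String :=
  match pvDropBlanksB (pvSplitNL markdown) with
  | [] => markdown
  | h :: t =>
    if !(PySem.Str.startswith (PySem.Str.strip h) "# ") then markdown
    else
      match pvDropBlanksB t with
      | [] => PySem.Str.join "\n" ([] : List String)
      | h2 :: t2 =>
        if !(PySem.Str.startswith (PySem.Str.strip h2) "#") then
          PySem.Str.join "\n" (pvDropBlanksB t2)
        else PySem.Str.join "\n" (h2 :: t2)

-- ===== PRECONDITION & SPEC =====
def Spec_strip_leading_title_py (markdown : String) (out : String) : Prop := out = strip_leading_title_py_alt markdown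
instance (markdown : String) (out : String) : Decidable (Spec_strip_leading_title_py markdown out) := by unfold Spec_strip_leading_title_py; infer_instance

-- ===== CLAIM (what is proved, stated in full; the proofs are below) =====
def Claim_equal_strip_leading_title_py : Prop := ∀ (markdown : String), Dom_strip_leading_title_py markdown → Spec_strip_leading_title_py markdown (strip_leading_title_py markdown)

-- ===== LEMMAS AND PROOFS =====

-- A's blank-skip index loop reaches the same suffix as B's recursive dropper
theorem skipA_drop (lines : List String) (start : Nat) :
    lines.drop (pvSkipBlanksA lines start) = pvDropBlanksB (lines.drop start) := by
  fun_induction pvSkipBlanksA lines start with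
  | case1 start hlt hb ih =>
    rw [List.getD_eq_getElem lines "" hlt] at hb
    rw [ih, List.drop_eq_getElem_cons hlt]
    simp only [pvDropBlanksB]
    rw [if_pos hb]
  | case2 start hlt hb =>
    rw [List.getD_eq_getElem lines "" hlt] at hb
    rw [List.drop_eq_getElem_cons hlt]
    simp only [pvDropBlanksB]
    rw [if_neg hb, ← List.drop_eq_getElem_cons hlt]
  | case3 start hge =>
    rw [List.drop_of_length_le (by omega)]
    rfl

theorem skipA_of_nonblank (lines : List String) (start : Nat)
    (h : ¬ (PySem.Str.strip (lines.getD start "") == "") = true) :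
    pvSkipBlanksA lines start = start := by
  rw [pvSkipBlanksA]
  simp only [h]
  split <;> rfl

theorem skipA_of_ge (lines : List String) (start : Nat) (h : lines.length ≤ start) :
    pvSkipBlanksA lines start = start := by
  rw [pvSkipBlanksA]
  simp [Nat.not_lt.mpr h]

-- A's middle loop followed by its trailing blank-skip equals B's post-title processing
theorem midA_drop (lines : List String) (s : Nat) :
    lines.drop (pvSkipBlanksA lines (pvMidA lines s)) =
      (match pvDropBlanksB (lines.drop s) with
       | [] => []
       | h :: t => if PySem.Str.startswith (PySem.Str.strip h) "#" then h :: t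
                   else pvDropBlanksB t) := by
  fun_induction pvMidA lines s with
  | case1 s hlt str hb ih =>
    rw [ih, List.drop_eq_getElem_cons hlt]
    simp only [pvDropBlanksB, str] at hb ⊢
    rw [List.getD_eq_getElem lines "" hlt] at hb
    rw [if_pos hb]
  | case2 s hlt str hb hsw =>
    rw [skipA_of_nonblank lines s (by simpa [str] using hb)]
    rw [List.drop_eq_getElem_cons hlt]
    simp only [pvDropBlanksB, str] at hb hsw ⊢
    rw [List.getD_eq_getElem lines "" hlt] at hb hsw
    rw [if_neg (by simpa using hb)]
    simp only [hsw]
    rfl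
  | case3 s hlt str hb hsw =>
    rw [skipA_drop lines (s + 1), List.drop_eq_getElem_cons hlt]
    simp only [pvDropBlanksB, str] at hb hsw ⊢
    rw [List.getD_eq_getElem lines "" hlt] at hb hsw
    rw [if_neg (by simpa using hb)]
    rw [Bool.not_eq_true] at hsw
    simp only [hsw]
    rfl
  | case4 s hge =>
    rw [skipA_of_ge lines s (by omega), List.drop_of_length_le (by omega)]
    rfl

-- a string starting with "# " cannot start with "## "
theorem not_starts_hh (s : String) (h : PySem.Str.startswith s "# " = true) :
    PySem.Str.startswith s "## " = false := by
  rw [PySem.Str.startswith_eq] at *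
  rw [PySem.Chars.startswith_iff] at h
  by_contra hc
  rw [Bool.not_eq_false, PySem.Chars.startswith_iff] at hc
  obtain ⟨u, hu⟩ := h
  obtain ⟨v, hv⟩ := hc
  rw [show ("# ".toList) = ['#', ' '] from rfl] at hu
  rw [show ("## ".toList) = ['#', '#', ' '] from rfl] at hv
  rw [← hu] at hv
  simp at hv

-- ===== VERDICT (by name: the statement is the Claim_ definition above) =====
theorem strip_leading_title_py_spec : Claim_equal_strip_leading_title_py := by
  intro markdown _
  unfold Spec_strip_leading_title_py strip_leading_title_py strip_leading_title_py_alt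
  have h0 := skipA_drop (pvSplitNL markdown) 0
  rw [List.drop_zero] at h0
  rcases hrest : pvDropBlanksB (pvSplitNL markdown) with _ | ⟨h, t⟩
  · rw [hrest] at h0
    rw [if_pos (by rw [← List.drop_eq_nil_iff]; exact h0)]
  · rw [hrest] at h0
    have hlt : pvSkipBlanksA (pvSplitNL markdown) 0 < (pvSplitNL markdown).length := by
      by_contra hge
      rw [List.drop_of_length_le (by omega)] at h0
      exact List.cons_ne_nil _ _ h0.symm
    rw [if_neg (by omega)]
    have hget : (pvSplitNL markdown).getD (pvSkipBlanksA (pvSplitNL markdown) 0) "" = h := by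
      rw [List.getD_eq_getElem _ "" hlt]
      have hc := List.drop_eq_getElem_cons hlt
      rw [h0] at hc
      exact (List.cons_eq_cons.mp hc).1.symm
    rw [hget]
    by_cases hsw : PySem.Str.startswith (PySem.Str.strip h) "# " = true
    · simp only [hsw, not_starts_hh _ hsw, Bool.not_false, Bool.and_true, Bool.not_true, if_true,
        Bool.false_eq_true, if_false]
      have htail : (pvSplitNL markdown).drop (pvSkipBlanksA (pvSplitNL markdown) 0 + 1) = t := by
        have hc := List.drop_eq_getElem_cons hlt
        rw [h0] at hc
        exact (List.cons_eq_cons.mp hc).2.symm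
      have hm := midA_drop (pvSplitNL markdown) (pvSkipBlanksA (pvSplitNL markdown) 0 + 1)
      rw [htail] at hm
      rw [hm]
      rcases hr2 : pvDropBlanksB t with _ | ⟨h2, t2⟩
      · rfl
      · by_cases hsw2 : PySem.Str.startswith (PySem.Str.strip h2) "#" = true
        · simp only [hsw2]
          rfl
        · rw [Bool.not_eq_true] at hsw2
          simp only [hsw2]
          rfl
    · rw [Bool.not_eq_true] at hsw
      simp only [hsw, Bool.false_and, Bool.not_false, if_true, Bool.false_eq_true, if_false]
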